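-- pv_equiv track=rewrite | github.com/omer-kati/Fifa-predictions | data_cleaner.py | filter_position
-- ===== SOURCE A (Python) =====
-- def filter_position(list):
--     newList= []
--     for p in list:
--         category = p.split(",")[0]
--         if category in ["LW","ST","RW","CF"]:
--             newList.append('attacker')
--         elif category in ["LM","CM","RM","CAM","CDM"]:
--             newList.append('midfielder')
--         elif category in ["LB","CB","RB","LWB","RWB"]:
--             newList.append('defender')
--         else:
--             newList.append('goal')
--
--     return newList
-- ===== SOURCE B (Python) =====
-- GROUPS = (
--     ('attacker', ('LW', 'ST', 'RW', 'CF')),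
--     ('midfielder', ('LM', 'CM', 'RM', 'CAM', 'CDM')),
--     ('defender', ('LB', 'CB', 'RB', 'LWB', 'RWB')),
-- )
--
-- def filter_position(list):
--     cats = [p.split(",")[0] for p in list]
--     out = ['goal'] * len(cats)
--     for label, codes in GROUPS:
--         for i, c in enumerate(cats):
--             if c in codes:
--                 out[i] = label
--     return out
-- ===== Notes on version B (the rewrite author's own statement) =====
-- stated objective: alternative
-- what changed: Instead of classifying each element with a four-way if/elif cascade inside one append loop, B preallocates the whole output as 'goal' and makes three staged passes, one per disjoint category group, overwriting in place the positions whose code belongs to that group.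
import Mathlib
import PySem

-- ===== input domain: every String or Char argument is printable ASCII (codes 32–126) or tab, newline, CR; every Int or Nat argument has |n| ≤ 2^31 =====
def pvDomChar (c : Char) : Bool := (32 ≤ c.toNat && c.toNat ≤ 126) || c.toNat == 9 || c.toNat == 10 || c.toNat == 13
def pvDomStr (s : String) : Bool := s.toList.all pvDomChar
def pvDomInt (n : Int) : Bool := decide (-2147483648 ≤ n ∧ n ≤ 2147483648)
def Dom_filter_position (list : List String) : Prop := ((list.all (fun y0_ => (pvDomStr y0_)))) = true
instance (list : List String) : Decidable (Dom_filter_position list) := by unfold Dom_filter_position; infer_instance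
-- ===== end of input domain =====

-- B replaces A's per-element four-way if/elif cascade by a preallocated all-'goal' output
-- overwritten in three staged passes, one per disjoint category group; objective: alternative.

-- ===== PORT A =====
def filter_position (list : List String) : List String :=
  list.foldl (fun newList p =>
    let category := ((PySem.Str.split? p ",").getD []).headD ""   -- p.split(",") is never empty, so [0] is its head
    if ["LW","ST","RW","CF"].contains category then newList ++ ["attacker"]
    else if ["LM","CM","RM","CAM","CDM"].contains category then newList ++ ["midfielder"]
    else if ["LB","CB","RB","LWB","RWB"].contains category then newList ++ ["defender"]
    else newList ++ ["goal"]) []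

-- ===== PORT B =====
def pvGroups : List (String × List String) :=
  [("attacker", ["LW","ST","RW","CF"]),
   ("midfielder", ["LM","CM","RM","CAM","CDM"]),
   ("defender", ["LB","CB","RB","LWB","RWB"])]

def filter_position_alt (list : List String) : List String :=
  let cats := list.map (fun p => ((PySem.Str.split? p ",").getD []).headD "")
  let out := List.replicate cats.length "goal"
  pvGroups.foldl (fun out lc =>
    (PySem.List.enumerate cats 0).foldl (fun o ic =>
      if lc.2.contains ic.2 then o.set ic.1.toNat lc.1 else o) out) out

-- ===== PRECONDITION & SPEC =====
def Spec_filter_position (list : List String) (out : List String) : Prop := out = filter_position_alt list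
instance (list : List String) (out : List String) : Decidable (Spec_filter_position list out) := by unfold Spec_filter_position; infer_instance

-- ===== CLAIM (what is proved, stated in full; the proofs are below) =====
def Claim_equal_filter_position : Prop := ∀ (list : List String), Dom_filter_position list → Spec_filter_position list (filter_position list)

-- ===== LEMMAS AND PROOFS =====

-- one pass over 'enumerate' starting at s+1 leaves the head of the accumulator untouched
theorem pv_shift (codes : List String) (label : String) (cats : List String)
    (x : String) (out : List String) (s : Nat) :
    (PySem.List.enumerate cats ((s : Int) + 1)).foldl
      (fun o ic => if codes.contains ic.2 then o.set ic.1.toNat label else o) (x :: out)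
    = x :: (PySem.List.enumerate cats (s : Int)).foldl
      (fun o ic => if codes.contains ic.2 then o.set ic.1.toNat label else o) out := by
  induction cats generalizing out s x with
  | nil => simp [PySem.List.enumerate_nil]
  | cons c cs ih =>
    rw [PySem.List.enumerate_cons, PySem.List.enumerate_cons]
    simp only [List.foldl_cons]
    have ht : ((s : Int) + 1).toNat = (s : Int).toNat + 1 := by omega
    by_cases hc : codes.contains c
    · simp only [hc, if_pos, ht, List.set_cons_succ]
      have : ((s : Int) + 1 + 1) = ((s + 1 : Nat) : Int) + 1 := by push_cast; ring
      rw [this, ih]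
      norm_cast
    · simp only [hc, if_neg, Bool.false_eq_true, not_false_iff]
      have : ((s : Int) + 1 + 1) = ((s + 1 : Nat) : Int) + 1 := by push_cast; ring
      rw [this, ih]
      norm_cast
  
-- one pass rewrites the accumulator pointwise
theorem pv_inner (codes : List String) (label : String) :
    ∀ (cats out : List String), out.length = cats.length →
    (PySem.List.enumerate cats 0).foldl
      (fun o ic => if codes.contains ic.2 then o.set ic.1.toNat label else o) out
    = (cats.zip out).map (fun co => if codes.contains co.1 then label else co.2) := by
  intro cats
  induction cats with
  | nil =>
    intro out h
    cases out with
    | nil => simp [PySem.List.enumerate_nil]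
    | cons a t => simp at h
  | cons c cs ih =>
    intro out h
    cases out with
    | nil => simp at h
    | cons o out' =>
      rw [PySem.List.enumerate_cons]
      simp only [List.foldl_cons]
      have h0 : ((0 : Int)).toNat = 0 := rfl
      have hstep : (if codes.contains c then (o :: out').set (0 : Int).toNat label else o :: out')
          = (if codes.contains c then label else o) :: out' := by
        split_ifs <;> rfl
      rw [hstep]
      have : ((0 : Int) + 1) = ((0 : Nat) : Int) + 1 := by norm_num
      rw [this, pv_shift]
      have hlen : out'.length = cs.length := by simpa using h
      rw [show ((0 : Nat) : Int) = (0 : Int) from rfl, ih out' hlen]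
      simp [List.zip_cons_cons]

-- pointwise pass over a mapped accumulator
theorem pv_zip_map (codes : List String) (label : String) (g : String → String) :
    ∀ (cats : List String),
    ((cats.zip (cats.map g)).map (fun co => if codes.contains co.1 then label else co.2))
    = cats.map (fun c => if codes.contains c then label else g c) := by
  intro cats
  induction cats with
  | nil => rfl
  | cons c cs ih => simp only [List.map_cons, List.zip_cons_cons, ih]

-- a full pass applied to a mapped accumulator is again a map
theorem pv_pass_map (codes : List String) (label : String) (g : String → String) (cats : List String) :
    (PySem.List.enumerate cats 0).foldl
      (fun o ic => if codes.contains ic.2 then o.set ic.1.toNat label else o) (cats.map g)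
    = cats.map (fun c => if codes.contains c then label else g c) := by
  rw [pv_inner _ _ _ _ (by simp), pv_zip_map]

-- A's append-accumulator fold is exactly a map
theorem pv_foldl_map (f : String → String) (l : List String) (acc : List String) :
    l.foldl (fun a p => a ++ [f p]) acc = acc ++ l.map f := by
  induction l generalizing acc with
  | nil => simp
  | cons h t ih => simp [List.foldl, ih]

-- per-category-code: overwrite order (attacker, then midfielder, then defender) agrees with
-- A's cascade order, since the three groups are disjoint
theorem pv_cell (c : String) :
    (if ["LB","CB","RB","LWB","RWB"].contains c then "defender"
     else if ["LM","CM","RM","CAM","CDM"].contains c then "midfielder"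
     else if ["LW","ST","RW","CF"].contains c then "attacker"
     else "goal")
    = (if ["LW","ST","RW","CF"].contains c then "attacker"
       else if ["LM","CM","RM","CAM","CDM"].contains c then "midfielder"
       else if ["LB","CB","RB","LWB","RWB"].contains c then "defender"
       else "goal") := by
  by_cases hA : ["LW","ST","RW","CF"].contains c <;>
  by_cases hM : ["LM","CM","RM","CAM","CDM"].contains c <;>
  by_cases hD : ["LB","CB","RB","LWB","RWB"].contains c <;>
  simp only [hA, hM, hD, if_pos, if_neg, Bool.false_eq_true, not_false_iff] <;>
  first
    | rfl
    | (exfalso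
       rw [List.contains_iff_mem] at *
       first
         | (fin_cases hA <;> revert hM hD <;> simp_all)
         | (fin_cases hM <;> revert hD <;> simp_all))

-- ===== VERDICT (by name: the statement is the Claim_ definition above) =====
theorem filter_position_spec : Claim_equal_filter_position := by
  intro list _
  show filter_position list = filter_position_alt list
  unfold filter_position filter_position_alt
  set f : String → String := fun p => ((PySem.Str.split? p ",").getD []).headD "" with hf
  -- A side: the fold is a map of the cascade
  have hA : list.foldl (fun newList p =>
      if ["LW","ST","RW","CF"].contains (f p) then newList ++ ["attacker"]
      else if ["LM","CM","RM","CAM","CDM"].contains (f p) then newList ++ ["midfielder"]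
      else if ["LB","CB","RB","LWB","RWB"].contains (f p) then newList ++ ["defender"]
      else newList ++ ["goal"]) []
      = list.map (fun p =>
        if ["LW","ST","RW","CF"].contains (f p) then "attacker"
        else if ["LM","CM","RM","CAM","CDM"].contains (f p) then "midfielder"
        else if ["LB","CB","RB","LWB","RWB"].contains (f p) then "defender"
        else "goal") := by
    have := pv_foldl_map (fun p =>
      if ["LW","ST","RW","CF"].contains (f p) then "attacker"
      else if ["LM","CM","RM","CAM","CDM"].contains (f p) then "midfielder"
      else if ["LB","CB","RB","LWB","RWB"].contains (f p) then "defender"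
      else "goal") list []
    simp only [List.nil_append] at this
    rw [← this]
    congr 1
    funext a p
    split_ifs <;> rfl
  rw [hA]
  -- B side: evaluate the three passes
  set cats : List String := list.map f with hcats
  have hrep : List.replicate cats.length "goal" = cats.map (fun _ => "goal") := by
    simp [List.map_const']
  rw [show pvGroups = [("attacker", ["LW","ST","RW","CF"]),
        ("midfielder", ["LM","CM","RM","CAM","CDM"]),
        ("defender", ["LB","CB","RB","LWB","RWB"])] from rfl]
  rw [List.foldl_cons, List.foldl_cons, List.foldl_cons, List.foldl_nil]
  dsimp only
  rw [hrep, pv_pass_map, pv_pass_map, pv_pass_map]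
  rw [hcats, List.map_map]
  apply List.map_congr_left
  intro p _
  exact (pv_cell (f p)).symm
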